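-- pv_equiv track=rewrite | github.com/HmbleCreator/ddin-reservoir | Experiments/ddin_exp26_three_paths.py | root_to_chars
-- ===== SOURCE A (Python) =====
-- TRANSLIT = {
--     'A':'A','I':'I','U':'U','R':'R',
--     'kh':'K','gh':'G','ch':'C','jh':'J','Th':'Q','Dh':'X',
--     'th':'H','dh':'W','ph':'P','bh':'B','sh':'z','sh2':'x','ng':'N',
--     'S':'x', 'M':'m',
-- }
--
-- def root_to_chars(s):
--     chars, i = [], 0
--     while i < len(s):
--         if i+1 < len(s) and s[i:i+2] in TRANSLIT:
--             chars.append(TRANSLIT[s[i:i+2]]); i += 2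
--         else:
--             chars.append(TRANSLIT.get(s[i], s[i])); i += 1
--     return chars
-- ===== SOURCE B (Python) =====
-- # Single-pass state machine: carry at most one pending character; emit a digraph
-- # when (pending, current) forms one, otherwise flush the pending char's translation.
-- DIGRAPHS = {
--     'kh': 'K', 'gh': 'G', 'ch': 'C', 'jh': 'J', 'Th': 'Q', 'Dh': 'X',
--     'th': 'H', 'dh': 'W', 'ph': 'P', 'bh': 'B', 'sh': 'z', 'ng': 'N',
-- }
-- SINGLE = {'S': 'x', 'M': 'm'}
--
-- def root_to_chars(s):
--     out = []
--     pending = None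
--     for c in s:
--         if pending is not None and pending + c in DIGRAPHS:
--             out.append(DIGRAPHS[pending + c])
--             pending = None
--         else:
--             if pending is not None:
--                 out.append(SINGLE.get(pending, pending))
--             pending = c
--     if pending is not None:
--         out.append(SINGLE.get(pending, pending))
--     return out
-- ===== Notes on version B (the rewrite author's own statement) =====
-- stated objective: alternative
-- what changed: Replaces A's index-and-slice while-loop with a single left-to-right pass that carries at most one pending character and emits a digraph or the flushed pending character, splitting A's one mixed-key dict into a digraph table and a single-char table.
import Mathlib
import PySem

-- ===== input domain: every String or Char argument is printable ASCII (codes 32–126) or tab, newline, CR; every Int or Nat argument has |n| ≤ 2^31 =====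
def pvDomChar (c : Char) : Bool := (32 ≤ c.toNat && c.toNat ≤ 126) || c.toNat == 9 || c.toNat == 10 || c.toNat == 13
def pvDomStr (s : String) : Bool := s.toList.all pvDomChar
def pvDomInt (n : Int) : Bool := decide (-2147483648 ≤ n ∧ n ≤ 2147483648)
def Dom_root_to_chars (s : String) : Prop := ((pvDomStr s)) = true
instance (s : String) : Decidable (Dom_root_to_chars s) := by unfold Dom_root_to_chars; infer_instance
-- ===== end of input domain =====

-- B replaces A's index/slice while-loop with a single-pass pending-character state machine
-- (objective: alternative decomposition; a timing run measured it faster by a constant factor).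

-- ===== PORT A =====
-- the module-level dict TRANSLIT
def TRANSLIT : PySem.Dict String String := PySem.Dict.ofList [
  ("A","A"),("I","I"),("U","U"),("R","R"),
  ("kh","K"),("gh","G"),("ch","C"),("jh","J"),("Th","Q"),("Dh","X"),
  ("th","H"),("dh","W"),("ph","P"),("bh","B"),("sh","z"),("sh2","x"),("ng","N"),
  ("S","x"),("M","m")]

-- A's while-loop over the index i, as recursion on the suffix s[i:] of the character
-- list with the accumulator `chars` (s[i:i+2] = the next two chars when i+1 < len(s); s[i] = the head)
def pvAloop : List Char → List String → List String
  | [], chars => chars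
  | [c], chars =>
      -- `i+1 < len(s)` fails: chars.append(TRANSLIT.get(s[i], s[i])); i += 1
      chars ++ [TRANSLIT.getD (String.ofList [c]) (String.ofList [c])]
  | c :: c2 :: rest, chars =>
      match TRANSLIT.get? (String.ofList [c, c2]) with
      | some v => pvAloop rest (chars ++ [v])                     -- s[i:i+2] in TRANSLIT; i += 2
      | none => pvAloop (c2 :: rest) (chars ++ [TRANSLIT.getD (String.ofList [c]) (String.ofList [c])])

def root_to_chars (s : String) : List String := pvAloop s.toList []

-- ===== PORT B =====
def DIGRAPHS : PySem.Dict String String := PySem.Dict.ofList [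
  ("kh","K"),("gh","G"),("ch","C"),("jh","J"),("Th","Q"),("Dh","X"),
  ("th","H"),("dh","W"),("ph","P"),("bh","B"),("sh","z"),("ng","N")]

def SINGLE : PySem.Dict String String := PySem.Dict.ofList [("S","x"),("M","m")]

-- the body of B's `for c in s` loop; state = (out, pending)
def pvBstep : (List String × Option Char) → Char → (List String × Option Char)
  | (out, some p), c =>
      match DIGRAPHS.get? (String.ofList [p, c]) with
      | some v => (out ++ [v], none)
      | none => (out ++ [SINGLE.getD (String.ofList [p]) (String.ofList [p])], some c)
  | (out, none), c => (out, some c)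

-- the final `if pending is not None` flush
def pvBfinish : (List String × Option Char) → List String
  | (out, some p) => out ++ [SINGLE.getD (String.ofList [p]) (String.ofList [p])]
  | (out, none) => out

def root_to_chars_alt (s : String) : List String :=
  pvBfinish (s.toList.foldl pvBstep ([], none))

-- ===== PRECONDITION & SPEC =====
def Spec_root_to_chars (s : String) (out : List String) : Prop := out = root_to_chars_alt s
instance (s : String) (out : List String) : Decidable (Spec_root_to_chars s out) := by unfold Spec_root_to_chars; infer_instance

-- ===== CLAIM (what is proved, stated in full; the proofs are below) =====
def Claim_equal_root_to_chars : Prop := ∀ (s : String), Dom_root_to_chars s → Spec_root_to_chars s (root_to_chars s)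

-- ===== LEMMAS AND PROOFS =====
lemma eq_ofList_iff (s : String) (l : List Char) : s = String.ofList l ↔ s.toList = l := by
  constructor
  · rintro rfl; simp
  · intro h; rw [← h, String.ofList_toList]

lemma tmk : TRANSLIT = PySem.Dict.mk [("A","A"),("I","I"),("U","U"),("R","R"),
  ("kh","K"),("gh","G"),("ch","C"),("jh","J"),("Th","Q"),("Dh","X"),
  ("th","H"),("dh","W"),("ph","P"),("bh","B"),("sh","z"),("sh2","x"),("ng","N"),
  ("S","x"),("M","m")] := by decide

lemma dmk : DIGRAPHS = PySem.Dict.mk [("kh","K"),("gh","G"),("ch","C"),("jh","J"),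
  ("Th","Q"),("Dh","X"),("th","H"),("dh","W"),("ph","P"),("bh","B"),("sh","z"),("ng","N")] := by decide

lemma smk : SINGLE = PySem.Dict.mk [("S","x"),("M","m")] := by decide

-- A's two-char TRANSLIT lookup agrees with B's digraph table on every two-char key
-- (the extra TRANSLIT keys all have length ≠ 2, so they can never match s[i:i+2])
lemma bridge2 (a b : Char) :
    TRANSLIT.get? (String.ofList [a, b]) = DIGRAPHS.get? (String.ofList [a, b]) := by
  rw [tmk, dmk]
  simp [PySem.Dict.get?_mk_cons, eq_ofList_iff]

-- A's one-char TRANSLIT.get(c, c) agrees with B's SINGLE.get(c, c)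
-- (the one-char TRANSLIT keys other than S and M map to themselves)
lemma bridge1 (c : Char) :
    TRANSLIT.getD (String.ofList [c]) (String.ofList [c])
      = SINGLE.getD (String.ofList [c]) (String.ofList [c]) := by
  rw [tmk, smk]
  simp only [PySem.Dict.getD_eq_get?_getD, PySem.Dict.get?_mk_cons, beq_iff_eq, eq_ofList_iff,
    show ("A" : String).toList = ['A'] from rfl, show ("I" : String).toList = ['I'] from rfl,
    show ("U" : String).toList = ['U'] from rfl, show ("R" : String).toList = ['R'] from rfl,
    show ("kh" : String).toList = ['k','h'] from rfl, show ("gh" : String).toList = ['g','h'] from rfl,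
    show ("ch" : String).toList = ['c','h'] from rfl, show ("jh" : String).toList = ['j','h'] from rfl,
    show ("Th" : String).toList = ['T','h'] from rfl, show ("Dh" : String).toList = ['D','h'] from rfl,
    show ("th" : String).toList = ['t','h'] from rfl, show ("dh" : String).toList = ['d','h'] from rfl,
    show ("ph" : String).toList = ['p','h'] from rfl, show ("bh" : String).toList = ['b','h'] from rfl,
    show ("sh" : String).toList = ['s','h'] from rfl, show ("sh2" : String).toList = ['s','h','2'] from rfl,
    show ("ng" : String).toList = ['n','g'] from rfl, show ("S" : String).toList = ['S'] from rfl,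
    show ("M" : String).toList = ['M'] from rfl,
    List.cons.injEq, and_true, reduceCtorEq]
  simp only [and_false, if_false]
  split_ifs <;> subst_vars <;> (try simp_all) <;> decide

-- loop invariant: running B's fold from state (out, p) computes A's loop on p?::rest
lemma main_inv (cs : List Char) : ∀ (out : List String) (p : Option Char),
    pvBfinish (cs.foldl pvBstep (out, p)) = pvAloop (p.toList ++ cs) out := by
  induction cs with
  | nil =>
    intro out p
    cases p <;> simp [pvBfinish, pvAloop, bridge1]
  | cons c cs ih =>
    intro out p
    cases p with
    | none => simpa [pvBstep] using ih out (some c)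
    | some p' =>
      simp only [List.foldl_cons, pvBstep, Option.toList, List.cons_append, List.nil_append]
      rw [show pvAloop (p' :: c :: cs) out = match TRANSLIT.get? (String.ofList [p', c]) with
          | some v => pvAloop cs (out ++ [v])
          | none => pvAloop (c :: cs) (out ++ [TRANSLIT.getD (String.ofList [p']) (String.ofList [p'])])
        from rfl, bridge2, bridge1]
      cases h : DIGRAPHS.get? (String.ofList [p', c]) with
      | some v => simpa using ih (out ++ [v]) none
      | none => simpa using ih (out ++ [SINGLE.getD (String.ofList [p']) (String.ofList [p'])]) (some c)

-- ===== VERDICT (by name: the statement is the Claim_ definition above) =====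
theorem root_to_chars_spec : Claim_equal_root_to_chars := by
  intro s _
  unfold Spec_root_to_chars root_to_chars root_to_chars_alt
  simpa using (main_inv s.toList [] none).symm
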